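-- pv_equiv track=rewrite | github.com/variety82/Algorithm | 백준/Gold/14698. 전생했더니 슬라임 연구자였던 건에 대하여 （Hard）/전생했더니 슬라임 연구자였던 건에 대하여 （Hard）.py | solution
-- ===== SOURCE A (Python) =====
-- import heapq
--
-- modulo = 1000000007
--
-- def solution(slime):
--     heapq.heapify(slime)
--     cost = 1
--     while(len(slime) != 1):
--         first = heapq.heappop(slime)
--         second = heapq.heappop(slime)
--         multiple = first * second
--         cost = (cost * multiple) % modulo
--         heapq.heappush(slime, multiple)
--     return cost % modulo
-- ===== SOURCE B (Python) =====
-- modulo = 1000000007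
--
-- def solution(slime):
--     # descending sorted-list priority queue instead of a binary heap (return value
--     # only: A heapifies/pops `slime` in place, B leaves the argument untouched)
--     q = sorted(slime, reverse=True)
--     cost = 1
--     while len(q) != 1:
--         m = q.pop() * q.pop()   # the two smallest; IndexError on empty, like heappop
--         cost = cost * m % modulo
--         lo, hi = 0, len(q)
--         while lo < hi:          # binary search for m's place in the descending list
--             mid = (lo + hi) // 2
--             if q[mid] > m:
--                 lo = mid + 1
--             else:
--                 hi = mid
--         q.insert(lo, m)
--     return cost % modulo
-- ===== Notes on version B (the rewrite author's own statement) =====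
-- stated objective: alternative
-- what changed: Replaces the binary heap with a descending sorted-list priority queue: sort once, pop the two smallest slimes from the end of the list each round, and re-insert their product at the position a hand-written binary search finds.
import Mathlib
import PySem

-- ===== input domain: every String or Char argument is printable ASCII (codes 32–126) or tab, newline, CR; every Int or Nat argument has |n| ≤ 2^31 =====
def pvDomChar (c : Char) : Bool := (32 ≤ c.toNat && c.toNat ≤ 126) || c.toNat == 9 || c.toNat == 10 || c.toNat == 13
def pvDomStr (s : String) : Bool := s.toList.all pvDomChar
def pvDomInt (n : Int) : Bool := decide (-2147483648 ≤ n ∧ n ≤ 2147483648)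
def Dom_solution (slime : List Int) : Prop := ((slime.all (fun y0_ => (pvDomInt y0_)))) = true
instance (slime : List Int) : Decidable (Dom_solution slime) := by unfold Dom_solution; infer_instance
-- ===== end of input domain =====

-- B replaces the binary heap with a descending sorted-list priority queue (pop the two
-- smallest from the end, re-insert the product at the position a binary search finds);
-- return value only: A heapifies/pops the argument list in place, B leaves it untouched.

def pvModulo : Int := 1000000007

-- ===== PORT A =====
-- heapq.heappop: library call ported by its contract — returns the minimum and the
-- heap without (one occurrence of) it; none = IndexError on an empty heap.
def heappopA (xs : List Int) : Option (Int × List Int) :=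
  match PySem.List.min? xs (fun y => y) with
  | none => none
  | some m => some (m, xs.erase m)

-- the while loop; fuel = initial length (the heap shrinks by one per round)
def loopA (fuel : Nat) (heap : List Int) (cost : Int) : Option Int :=
  match fuel with
  | 0 => none
  | fuel + 1 =>
    if heap.length = 1 then some (PySem.Int.mod cost pvModulo)
    else
      match heappopA heap with
      | none => none
      | some (first, h1) =>
        match heappopA h1 with
        | none => none
        | some (second, h2) =>
          let multiple := first * second
          loopA fuel (h2 ++ [multiple]) (PySem.Int.mod (cost * multiple) pvModulo)

-- heapq.heapify reorders the list in place (multiset unchanged); returns 0 (junk) on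
-- the empty list, where the Python raises IndexError (excluded by Pre_solution).
def solution (slime : List Int) : Int :=
  (loopA slime.length slime 1).getD 0

-- ===== PORT B =====
-- the binary-search loop `while lo < hi: mid=(lo+hi)//2; ...`; q[mid] is always in
-- range (mid < hi ≤ len(q)), so getD's default is never used
def bsLoop (q : List Int) (m : Int) (lo hi : Nat) : Nat :=
  if h : lo < hi then
    let mid := (lo + hi) / 2
    if m < q.getD mid 0 then bsLoop q m (mid + 1) hi else bsLoop q m lo mid
  else lo
termination_by hi - lo
decreasing_by all_goals omega

-- the while loop; q is kept sorted descending, q.pop() pops from the end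
def loopB (fuel : Nat) (q : List Int) (cost : Int) : Option Int :=
  match fuel with
  | 0 => none
  | fuel + 1 =>
    if q.length = 1 then some (PySem.Int.mod cost pvModulo)
    else
      match q.getLast? with            -- q.pop(): none = IndexError
      | none => none
      | some a =>
        let q1 := q.dropLast
        match q1.getLast? with         -- second q.pop()
        | none => none
        | some b =>
          let m := a * b
          let r := q1.dropLast
          loopB fuel (r.insertIdx (bsLoop r m 0 r.length) m)
            (PySem.Int.mod (cost * m) pvModulo)

def solution_alt (slime : List Int) : Int :=
  let q := PySem.List.sorted slime (fun y => y) true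
  (loopB q.length q 1).getD 0

-- ===== PRECONDITION & SPEC =====
-- Pre_ excludes only the empty list, on which both Pythons raise IndexError.
def Pre_solution (slime : List Int) : Prop := slime ≠ []
instance (slime : List Int) : Decidable (Pre_solution slime) := by unfold Pre_solution; infer_instance

def pvWitness_solution : List Int := [3, 1, 2]

def Spec_solution (slime : List Int) (out : Int) : Prop := out = solution_alt slime
instance (slime : List Int) (out : Int) : Decidable (Spec_solution slime out) := by unfold Spec_solution; infer_instance

-- ===== CLAIM (what is proved, stated in full; the proofs are below) =====
def Claim_equal_solution : Prop := ∀ (slime : List Int), Dom_solution slime → Pre_solution slime → Spec_solution slime (solution slime)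

-- ===== LEMMAS AND PROOFS =====

-- descending pairwise lists are antitone in the index
theorem desc_getElem_le (q : List Int) (hs : q.Pairwise (fun u v => v ≤ u))
    {i j : Nat} (hij : i ≤ j) (hj : j < q.length) : q[j] ≤ q[i]'(lt_of_le_of_lt hij hj) := by
  rcases Nat.lt_or_ge i j with h | h
  · exact (List.pairwise_iff_getElem.mp hs) i j _ hj h
  · have : i = j := le_antisymm hij h
    subst this; exact le_rfl

-- the binary search returns the first index of the descending list whose element is ≤ m
theorem bsLoop_spec (q : List Int) (m : Int) (hs : q.Pairwise (fun u v => v ≤ u)) :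
    ∀ lo hi, lo ≤ hi → hi ≤ q.length →
      (∀ j, j < lo → (hj : j < q.length) → m < q[j]) →
      (∀ j, hi ≤ j → (hj : j < q.length) → q[j] ≤ m) →
      bsLoop q m lo hi ≤ q.length ∧
      (∀ j, j < bsLoop q m lo hi → (hj : j < q.length) → m < q[j]) ∧
      (∀ j, bsLoop q m lo hi ≤ j → (hj : j < q.length) → q[j] ≤ m) := by
  intro lo hi
  induction lo, hi using bsLoop.induct q m with
  | case1 lo hi h mid hcmp ih =>
    intro _ hhi hlo' hhi'
    rw [show bsLoop q m lo hi = bsLoop q m ((lo + hi) / 2 + 1) hi by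
      rw [bsLoop, dif_pos h]; exact if_pos hcmp]
    have hmidlt : (lo + hi) / 2 < q.length := by omega
    refine ih (by omega) hhi ?_ hhi'
    intro j hj hjq
    have hmono : q[(lo + hi) / 2] ≤ q[j] := desc_getElem_le q hs (by omega) hmidlt
    have hm : m < q[(lo + hi) / 2] := by
      rwa [List.getD_eq_getElem q 0 hmidlt] at hcmp
    exact lt_of_lt_of_le hm hmono
  | case2 lo hi h mid hcmp ih =>
    intro _ hhi hlo' hhi'
    rw [show bsLoop q m lo hi = bsLoop q m lo ((lo + hi) / 2) by
      rw [bsLoop, dif_pos h]; exact if_neg hcmp]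
    have hmidlt : (lo + hi) / 2 < q.length := by omega
    refine ih (by omega) (by omega) hlo' ?_
    intro j hj hjq
    have h1 : q[j] ≤ q[(lo + hi) / 2] := desc_getElem_le q hs (by omega) hjq
    have h2 : q[(lo + hi) / 2] ≤ m := by
      rw [List.getD_eq_getElem q 0 hmidlt] at hcmp; omega
    exact le_trans h1 h2
  | case3 lo hi h =>
    intro hle hhi hlo' hhi'
    rw [show bsLoop q m lo hi = lo by rw [bsLoop, dif_neg h]]
    exact ⟨by omega, fun j hj hjq => hlo' j hj hjq, fun j hj hjq => hhi' j (by omega) hjq⟩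

-- inserting m at an index that splits the descending list keeps it descending
theorem insertIdx_desc (r : List Int) (m : Int) (i : Nat) (hi : i ≤ r.length)
    (hr : r.Pairwise (fun u v => v ≤ u))
    (h1 : ∀ j, j < i → (hj : j < r.length) → m < r[j])
    (h2 : ∀ j, i ≤ j → (hj : j < r.length) → r[j] ≤ m) :
    (r.insertIdx i m).Pairwise (fun u v => v ≤ u) := by
  induction r generalizing i with
  | nil =>
    have : i = 0 := by simpa using hi
    subst this; simp
  | cons x xs ih =>
    match i with
    | 0 =>
      rw [List.insertIdx_zero]
      refine List.pairwise_cons.mpr ⟨?_, hr⟩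
      intro y hy
      rcases List.mem_iff_getElem.mp hy with ⟨j, hj, rfl⟩
      exact h2 j (Nat.zero_le j) hj
    | i + 1 =>
      rw [List.insertIdx_succ_cons]
      rcases List.pairwise_cons.mp hr with ⟨hx, hxs⟩
      refine List.pairwise_cons.mpr ⟨?_, ?_⟩
      · intro y hy
        rcases List.mem_cons.mp
          ((List.perm_insertIdx m xs (by simpa using hi)).mem_iff.mp hy) with rfl | hy'
        · exact le_of_lt (h1 0 (Nat.succ_pos i) (by simp))
        · exact hx y hy'
      · refine ih i (by simpa using hi) hxs ?_ ?_
        · intro j hj hjq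
          exact h1 (j + 1) (by omega) (by simpa using Nat.succ_lt_succ hjq)
        · intro j hj hjq
          exact h2 (j + 1) (by omega) (by simpa using Nat.succ_lt_succ hjq)

-- pop of a heap permuting a descending s ++ [a]: the minimum is a, remainder permutes s
theorem heappopA_of_perm_desc (heap : List Int) (a : Int) (s : List Int)
    (hp : heap.Perm (s ++ [a])) (hs : (s ++ [a]).Pairwise (fun u v => v ≤ u)) :
    ∃ h1, heappopA heap = some (a, h1) ∧ h1.Perm s := by
  have hp' : heap.Perm (a :: s) := hp.trans (List.perm_append_singleton a s)
  have hmem : a ∈ heap := hp'.mem_iff.mpr (List.mem_cons_self)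
  have hmin : ∀ y ∈ heap, a ≤ y := by
    intro y hy
    rcases List.mem_cons.mp (hp'.mem_iff.mp hy) with rfl | hy'
    · exact le_rfl
    · exact (List.pairwise_append.mp hs).2.2 y hy' a (List.mem_singleton_self a)
  have hne : heap ≠ [] := by
    intro h; subst h; simp at hmem
  obtain ⟨m', hm'⟩ : ∃ m', PySem.List.min? heap (fun y => y) = some m' := by
    cases hkn : PySem.List.min? heap (fun y => y) with
    | none => exact absurd (((PySem.List.min?_eq_none_iff heap (fun y => y)).mp hkn)) hne
    | some v => exact ⟨v, rfl⟩
  have hmem' : m' ∈ heap := PySem.List.min?_mem hm'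
  have heq : m' = a :=
    le_antisymm (by simpa using PySem.List.min?_isMin hm' a hmem) (hmin m' hmem')
  subst heq
  refine ⟨heap.erase m', by simp [heappopA, hm'], ?_⟩
  have := hp'.erase m'
  simpa [List.erase_cons_head] using this

-- a list of length ≥ 2 ends in two elements
theorem exists_concat_two (q : List Int) (h : 2 ≤ q.length) :
    ∃ r b a, q = r ++ [b, a] := by
  match q with
  | [] => simp at h
  | [x] => simp at h
  | x :: y :: rest =>
    clear h
    induction rest generalizing x y with
    | nil => exact ⟨[], x, y, rfl⟩
    | cons z zs ih =>
      obtain ⟨r, b, a, hr⟩ := ih y z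
      exact ⟨x :: r, b, a, by simp [hr]⟩

theorem loopA_eq_loopB (fuel : Nat) :
    ∀ (heap q : List Int) (cost : Int), heap.Perm q →
      q.Pairwise (fun u v => v ≤ u) →
      loopA fuel heap cost = loopB fuel q cost := by
  induction fuel with
  | zero => intro heap q cost _ _; rfl
  | succ fuel ih =>
    intro heap q cost hp hs
    simp only [loopA, loopB, hp.length_eq]
    split
    · rfl
    · rename_i hlen
      by_cases hq0 : q.length = 0
      · have : q = [] := List.eq_nil_of_length_eq_zero hq0
        subst this
        have : heap = [] := List.eq_nil_of_length_eq_zero (by simpa using hp.length_eq)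
        subst this
        simp [heappopA, PySem.List.min?]
      · obtain ⟨r, b, a, rfl⟩ := exists_concat_two q (by omega)
        have hra : r ++ [b, a] = (r ++ [b]) ++ [a] := by simp
        have hs1 : ((r ++ [b]) ++ [a]).Pairwise (fun u v => v ≤ u) := hra ▸ hs
        obtain ⟨h1, hpop1, hperm1⟩ :=
          heappopA_of_perm_desc heap a (r ++ [b]) (hra ▸ hp) hs1
        have hs2 : (r ++ [b]).Pairwise (fun u v => v ≤ u) :=
          hs1.sublist (List.sublist_append_left _ _)
        obtain ⟨h2, hpop2, hperm2⟩ := heappopA_of_perm_desc h1 b r hperm1 hs2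
        have hlast : (r ++ [b, a]).getLast? = some a := by
          rw [hra]; exact List.getLast?_concat
        have hdl : (r ++ [b, a]).dropLast = r ++ [b] := by
          rw [hra]; exact List.dropLast_concat
        have hlast2 : (r ++ [b]).getLast? = some b := List.getLast?_concat
        have hdl2 : (r ++ [b]).dropLast = r := List.dropLast_concat
        simp only [hpop1, hpop2, hlast, hdl, hlast2, hdl2]
        have hsr : r.Pairwise (fun u v => v ≤ u) :=
          hs2.sublist (List.sublist_append_left _ _)
        obtain ⟨hle, hlt, hge⟩ := bsLoop_spec r (a * b) hsr 0 r.length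
          (Nat.zero_le _) le_rfl (by omega) (by omega)
        apply ih
        · exact ((hperm2.append_right [a * b]).trans
            (List.perm_append_singleton _ _)).trans
            ((List.perm_insertIdx (a * b) r hle).symm)
        · exact insertIdx_desc r (a * b) _ hle hsr hlt hge

-- ===== VERDICT (by name: the statement is the Claim_ definition above) =====
theorem solution_spec : Claim_equal_solution := by
  intro slime _ _
  unfold Spec_solution solution solution_alt
  have hperm : slime.Perm (PySem.List.sorted slime (fun y => y) true) :=
    (PySem.List.sorted_perm slime (fun y => y) true).symm
  rw [loopA_eq_loopB slime.length slime _ 1 hperm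
    (PySem.List.sorted_pairwise_rev slime (fun y => y)), hperm.length_eq]
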